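-- pv_equiv track=rewrite | github.com/ParkHoH/Algorithm_test | programmers/LV_2/110 옮기기.py | solution
-- ===== SOURCE A (Python) =====
-- def solution(s):
--     result = []
--     i = 0
--     for string in s:
--         cnt = 0
--         while True:
--             ori_len = len(string)
--             string = ''.join(string.split("110"))
--             cnt += (ori_len - len(string)) // 3
--             if ori_len == len(string):
--                 break
--         idx = string.find("111")
--         if idx == -1:
--             result.append("110"*cnt + string)
--         else:
--             result.append(string[:idx] + "110"*cnt + string[idx:])
--     return result
-- ===== SOURCE B (Python) =====
-- def solution(s):
--     out = []
--     for string in s: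
--         stack = []
--         cnt = 0
--         for ch in string:
--             stack.append(ch)
--             if stack[-3:] == ['1', '1', '0']:
--                 del stack[-3:]
--                 cnt += 1
--         r = ''.join(stack)
--         idx = r.find("111")
--         if idx == -1:
--             out.append("110" * cnt + r)
--         else:
--             out.append(r[:idx] + "110" * cnt + r[idx:])
--     return out
-- ===== Notes on version B (the rewrite author's own statement) =====
-- stated objective: alternative
-- what changed: Replaces the repeat-until-fixpoint split/join removal of '110' by a single left-to-right stack pass that deletes '110' as it forms; '110' is unbordered, so the removal system is confluent and both yield the same residual and count.
import Mathlib
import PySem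

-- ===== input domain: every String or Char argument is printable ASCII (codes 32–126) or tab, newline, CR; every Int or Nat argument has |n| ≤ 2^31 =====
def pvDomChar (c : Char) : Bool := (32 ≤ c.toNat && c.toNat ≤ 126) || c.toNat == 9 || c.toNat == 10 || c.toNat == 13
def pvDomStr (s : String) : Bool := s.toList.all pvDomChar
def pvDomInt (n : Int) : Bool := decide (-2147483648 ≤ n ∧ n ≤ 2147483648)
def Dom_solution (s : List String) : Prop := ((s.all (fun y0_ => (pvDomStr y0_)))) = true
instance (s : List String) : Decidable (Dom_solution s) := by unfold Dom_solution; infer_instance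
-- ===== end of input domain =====

-- B replaces A's repeat-until-fixpoint ''.join(split("110")) removal by a single stack pass
-- deleting "110" as it forms; the proof shows both reach the same residual and count.

-- ===== PORT A =====
-- one ''.join(string.split("110")) pass, written structurally; used only to justify
-- termination of A's while-loop (solutionLoop cites pvJoinSplit_eq_pass / pvPass_length below)
def pvPass : List Char → List Char
  | [] => []
  | c :: t =>
      if c = '1' ∧ t.take 2 = ['1', '0'] then pvPass (t.drop 2)
      else c :: pvPass t
  termination_by l => l.length
  decreasing_by
  · simp [Nat.lt_succ_of_le (Nat.sub_le t.length 2)]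
  · simp

-- number of "110" occurrences removed by one pass
def pvCnt : List Char → Nat
  | [] => 0
  | c :: t =>
      if c = '1' ∧ t.take 2 = ['1', '0'] then pvCnt (t.drop 2) + 1
      else pvCnt t
  termination_by l => l.length
  decreasing_by
  · simp [Nat.lt_succ_of_le (Nat.sub_le t.length 2)]
  · simp

theorem pvPrefix110_iff (c : Char) (t : List Char) :
    (['1','1','0'].isPrefixOf (c :: t) = true) ↔ (c = '1' ∧ t.take 2 = ['1', '0']) := by
  rcases t with _ | ⟨a, _ | ⟨b, u⟩⟩ <;> (simp [List.isPrefixOf]; try aesop)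

theorem pvPass_cons_pos {c : Char} {t : List Char} (h : c = '1' ∧ t.take 2 = ['1', '0']) :
    pvPass (c :: t) = pvPass (t.drop 2) := by
  rw [pvPass.eq_def]; simp [h]

theorem pvPass_cons_neg {c : Char} {t : List Char} (h : ¬ (c = '1' ∧ t.take 2 = ['1', '0'])) :
    pvPass (c :: t) = c :: pvPass t := by
  rw [pvPass.eq_def]; simp [h]

theorem pvCnt_cons_pos {c : Char} {t : List Char} (h : c = '1' ∧ t.take 2 = ['1', '0']) :
    pvCnt (c :: t) = pvCnt (t.drop 2) + 1 := by
  rw [pvCnt.eq_def]; simp [h]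

theorem pvCnt_cons_neg {c : Char} {t : List Char} (h : ¬ (c = '1' ∧ t.take 2 = ['1', '0'])) :
    pvCnt (c :: t) = pvCnt t := by
  rw [pvCnt.eq_def]; simp [h]

theorem pvGo_flatten : ∀ (fuel : Nat) (l cur : List Char) (acc : List (List Char)),
    l.length < fuel →
    (PySem.Chars.splitOn.go ['1','1','0'] fuel l cur acc).flatten
      = acc.reverse.flatten ++ cur.reverse ++ pvPass l := by
  intro fuel
  induction fuel with
  | zero => intro l cur acc h; omega
  | succ fuel ih =>
    intro l cur acc h
    cases l with
    | nil => simp [PySem.Chars.splitOn.go, pvPass]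
    | cons c t =>
      by_cases hp : c = '1' ∧ t.take 2 = ['1', '0']
      · obtain ⟨hc, ht⟩ := hp
        rcases t with _ | ⟨a, _ | ⟨b, u⟩⟩ <;> simp at ht
        obtain ⟨ha, hb⟩ := ht
        subst hc ha hb
        rw [show PySem.Chars.splitOn.go ['1','1','0'] (fuel+1) ('1'::'1'::'0'::u) cur acc
              = PySem.Chars.splitOn.go ['1','1','0'] fuel u [] (cur.reverse :: acc) from by
            simp [PySem.Chars.splitOn.go, List.isPrefixOf]]
        rw [ih u [] (cur.reverse :: acc) (by simp at h; omega)]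
        rw [pvPass_cons_pos ⟨rfl, rfl⟩]
        simp
      · have hng : ¬ (['1','1','0'].isPrefixOf (c :: t) = true) := by
          rw [pvPrefix110_iff]; exact hp
        rw [show PySem.Chars.splitOn.go ['1','1','0'] (fuel+1) (c :: t) cur acc
              = PySem.Chars.splitOn.go ['1','1','0'] fuel t (c :: cur) acc from by
            simp only [PySem.Chars.splitOn.go]
            rw [if_neg hng]]
        rw [ih t (c :: cur) acc (by simp at h; omega)]
        rw [pvPass_cons_neg hp]
        simp

-- ''.join(string.split("110")) : the composite A applies each iteration
def pvJoinSplit (cs : List Char) : List Char :=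
  PySem.Chars.join [] (PySem.Chars.splitOn cs ['1','1','0'])

theorem pvJoin_nil_flatten (parts : List (List Char)) :
    PySem.Chars.join [] parts = parts.flatten := by
  simp only [PySem.Chars.join]
  induction parts with
  | nil => rfl
  | cons p t ih =>
    cases t with
    | nil => simp [List.intercalate, List.intersperse]
    | cons q u =>
      simp only [List.intercalate, List.intersperse] at *
      simp [← ih]

theorem pvJoinSplit_eq_pass (cs : List Char) : pvJoinSplit cs = pvPass cs := by
  rw [pvJoinSplit, pvJoin_nil_flatten, PySem.Chars.splitOn,
    pvGo_flatten (cs.length + 1) cs [] [] (Nat.lt_succ_self _)]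
  simp

theorem pvPass_length (l : List Char) : l.length = (pvPass l).length + 3 * pvCnt l := by
  induction l using pvPass.induct with
  | case1 => simp [pvPass, pvCnt]
  | case2 c t h ih =>
    obtain ⟨hc, ht⟩ := h
    rcases t with _ | ⟨a, _ | ⟨b, u⟩⟩ <;> simp at ht
    obtain ⟨ha, hb⟩ := ht; subst hc ha hb
    rw [pvPass_cons_pos ⟨rfl, rfl⟩, pvCnt_cons_pos ⟨rfl, rfl⟩]
    simp at ih ⊢
    omega
  | case3 c t h ih =>
    rw [pvPass_cons_neg h, pvCnt_cons_neg h]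
    simp
    omega

-- A's while-True loop: string = join(split(string)); cnt += (ori - len)//3; break when stable
def solutionLoop (cs : List Char) (cnt : Int) : List Char × Int :=
  if cs.length = (pvJoinSplit cs).length then
    (pvJoinSplit cs,
      cnt + PySem.Int.floordiv ((cs.length : Int) - ((pvJoinSplit cs).length : Int)) 3)
  else
    solutionLoop (pvJoinSplit cs)
      (cnt + PySem.Int.floordiv ((cs.length : Int) - ((pvJoinSplit cs).length : Int)) 3)
  termination_by cs.length
  decreasing_by
    rw [pvJoinSplit_eq_pass] at *
    have := pvPass_length cs
    omega

-- body of A's for-loop over the input list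
def solutionProcess (str : String) : String :=
  let p := solutionLoop str.toList 0
  let idx := PySem.Chars.find p.1 ['1','1','1']
  if idx = -1 then String.ofList (PySem.List.pyRepeat ['1','1','0'] p.2 ++ p.1)
  else String.ofList (PySem.Chars.slice p.1 none (some idx) ++ PySem.List.pyRepeat ['1','1','0'] p.2
        ++ PySem.Chars.slice p.1 (some idx) none)

def solution (s : List String) : List String :=
  s.foldl (fun result string => result ++ [solutionProcess string]) []

-- ===== PORT B =====
-- Source B's inner loop: push ch, and if the last three pushed are '1','1','0', pop them.
-- The stack is kept top-first here, so "last three" is the head `take 3` of the reversed view.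
def altStep (p : List Char × Int) (ch : Char) : List Char × Int :=
  let st := ch :: p.1
  if st.take 3 = ['0', '1', '1'] then (st.drop 3, p.2 + 1) else (st, p.2)

-- Source B's _melt: one stack pass, then the same reinsertion before the first "111"
def altProcess (str : String) : String :=
  let p := str.toList.foldl altStep ([], 0)
  let r := p.1.reverse
  let idx := PySem.Chars.find r ['1','1','1']
  if idx = -1 then String.ofList (PySem.List.pyRepeat ['1','1','0'] p.2 ++ r)
  else String.ofList (PySem.Chars.slice r none (some idx) ++ PySem.List.pyRepeat ['1','1','0'] p.2
        ++ PySem.Chars.slice r (some idx) none)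

def solution_alt (s : List String) : List String := s.map altProcess

-- ===== PRECONDITION & SPEC =====
def Spec_solution (s : List String) (out : List String) : Prop := out = solution_alt s
instance (s : List String) (out : List String) : Decidable (Spec_solution s out) := by unfold Spec_solution; infer_instance

-- ===== CLAIM (what is proved, stated in full; the proofs are below) =====
def Claim_equal_solution : Prop := ∀ (s : List String), Dom_solution s → Spec_solution s (solution s)

-- ===== LEMMAS AND PROOFS =====

theorem pvCnt_zero {l : List Char} (h : pvCnt l = 0) : pvPass l = l := by
  induction l using pvPass.induct with
  | case1 => simp [pvPass]
  | case2 c t hc ih => rw [pvCnt_cons_pos hc] at h; omega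
  | case3 c t hc ih =>
    rw [pvCnt_cons_neg hc] at h
    rw [pvPass_cons_neg hc, ih h]

theorem pvCnt_pos_of_infix {l : List Char} (h : ['1','1','0'] <:+: l) : 1 ≤ pvCnt l := by
  induction l using pvPass.induct with
  | case1 => simp at h
  | case2 c t hc ih => rw [pvCnt_cons_pos hc]; omega
  | case3 c t hc ih =>
    rw [pvCnt_cons_neg hc]
    rcases List.infix_cons_iff.mp h with hp | hi
    · exact absurd ((pvPrefix110_iff c t).mp (List.isPrefixOf_iff_prefix.mpr hp)) hc
    · exact ih hi

-- the counter accumulator of the stack fold is a pure offset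
theorem altFold_offset (l : List Char) (st : List Char) (c : Int) :
    l.foldl altStep (st, c) = ((l.foldl altStep (st, 0)).1, c + (l.foldl altStep (st, 0)).2) := by
  induction l generalizing st c with
  | nil => simp
  | cons ch t ih =>
    have hs : altStep (st, c) ch = ((altStep (st, 0) ch).1, c + (altStep (st, 0) ch).2) := by
      simp only [altStep]
      split <;> simp
    simp only [List.foldl_cons, hs]
    rw [ih, ih (altStep (st, 0) ch).1 (altStep (st, 0) ch).2]
    ring_nf

-- feeding "110" to the stack returns it unchanged and counts one removal
theorem altFold_110 (st : List Char) (c : Int) :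
    List.foldl altStep (st, c) ['1','1','0'] = (st, c + 1) := by
  simp [altStep, List.take]

-- the stack fold is invariant (modulo the count) under one split/join pass
theorem altFold_pass (l : List Char) : ∀ (st : List Char) (c : Int),
    l.foldl altStep (st, c)
      = (((pvPass l).foldl altStep (st, c)).1,
         ((pvPass l).foldl altStep (st, c)).2 + pvCnt l) := by
  induction l using pvPass.induct with
  | case1 => simp [pvPass, pvCnt]
  | case2 ch t h ih =>
    intro st c
    obtain ⟨hc, ht⟩ := h
    rcases t with _ | ⟨a, _ | ⟨b, u⟩⟩ <;> simp at ht
    obtain ⟨ha, hb⟩ := ht; subst hc ha hb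
    rw [pvPass_cons_pos ⟨rfl, rfl⟩, pvCnt_cons_pos ⟨rfl, rfl⟩]
    have h110 : ('1'::'1'::'0'::u).foldl altStep (st, c) = u.foldl altStep (st, c + 1) := by
      have heq : ('1'::'1'::'0'::u) = ['1','1','0'] ++ u := rfl
      rw [heq, List.foldl_append, altFold_110]
    simp only [List.drop_succ_cons, List.drop_zero] at ih ⊢
    rw [h110, ih st (c + 1)]
    rw [altFold_offset (pvPass u) st (c + 1), altFold_offset (pvPass u) st c]
    simp only [Prod.mk.injEq]
    refine ⟨trivial, ?_⟩
    push_cast; ring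
  | case3 ch t h ih =>
    intro st c
    rw [pvPass_cons_neg h, pvCnt_cons_neg h]
    simp only [List.foldl_cons]
    exact ih (altStep (st, c) ch).1 (altStep (st, c) ch).2

-- on a text free of "110" the stack never pops
theorem altFold_no_infix (l : List Char) : ∀ (st : List Char) (c : Int),
    ¬ (['1','1','0'] <:+: (st.reverse ++ l)) →
    l.foldl altStep (st, c) = (l.reverse ++ st, c) := by
  induction l with
  | nil => intro st c h; simp
  | cons ch t ih =>
    intro st c h
    have hstep : altStep (st, c) ch = (ch :: st, c) := by
      simp only [altStep]
      split
      · rename_i hc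
        exfalso
        rcases st with _ | ⟨a, _ | ⟨b, u⟩⟩ <;> simp at hc
        exact h ⟨u.reverse, t, by simp [hc]⟩
      · rfl
    simp only [List.foldl_cons, hstep]
    rw [ih (ch :: st) c (by
      intro hi; apply h
      simpa [List.append_assoc] using hi)]
    simp

-- B's single pass computes exactly A's loop fixpoint and count
theorem altFold_eq_loop (cs : List Char) (c : Int) :
    cs.foldl altStep ([], c) = ((solutionLoop cs c).1.reverse, (solutionLoop cs c).2) := by
  induction cs, c using solutionLoop.induct with
  | case1 cs c h =>
    have hk : pvCnt cs = 0 := by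
      rw [pvJoinSplit_eq_pass] at h
      have := pvPass_length cs
      omega
    have hp : pvPass cs = cs := pvCnt_zero hk
    have hni : ¬ (['1','1','0'] <:+: cs) := fun hi => by
      have := pvCnt_pos_of_infix hi; omega
    rw [solutionLoop, if_pos h, altFold_no_infix cs [] c (by simpa using hni)]
    simp [pvJoinSplit_eq_pass, hp, PySem.Int.floordiv]
  | case2 cs c h ih =>
    have hfd : PySem.Int.floordiv ((cs.length : Int) - ((pvJoinSplit cs).length : Int)) 3
        = (pvCnt cs : Int) := by
      rw [pvJoinSplit_eq_pass]
      have hlen := pvPass_length cs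
      have h3 : ((cs.length : Int) - ((pvPass cs).length : Int))
          = ((3 * pvCnt cs : Nat) : Int) := by push_cast; omega
      rw [h3]
      have h4 := PySem.Int.floordiv_natCast (3 * pvCnt cs) 3
      rw [Nat.mul_div_cancel_left _ (by norm_num : 0 < 3)] at h4
      exact_mod_cast h4
    rw [solutionLoop, if_neg h, ← ih]
    rw [hfd, pvJoinSplit_eq_pass, altFold_pass cs [] c]
    rw [altFold_offset (pvPass cs) [] c, altFold_offset (pvPass cs) [] (c + (pvCnt cs : Int))]
    simp only [Prod.mk.injEq]
    exact ⟨trivial, by ring⟩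

theorem process_eq (str : String) : solutionProcess str = altProcess str := by
  simp only [altProcess, solutionProcess, altFold_eq_loop, List.reverse_reverse]

-- ===== VERDICT (by name: the statement is the Claim_ definition above) =====
theorem solution_spec : Claim_equal_solution := by
  intro s _
  unfold Spec_solution solution solution_alt
  rw [PySem.List.foldl_append_singleton_eq_map]
  simp [process_eq]
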